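-- pv_equiv track=rewrite | github.com/NaLv2004/AlphaDetect | research/algorithm-IR/demo.py | excerpt_xdsl
-- ===== SOURCE A (Python) =====
-- def excerpt_xdsl(xdsl_text: str, needles: list[str], context: int = 1) -> str:
--     lines = xdsl_text.splitlines()
--     chosen: set[int] = set()
--     for index, line in enumerate(lines):
--         if any(needle in line for needle in needles):
--             for hit in range(max(0, index - context), min(len(lines), index + context + 1)):
--                 chosen.add(hit)
--     if not chosen:
--         return "[no matching xDSL lines found]"
--     ordered = []
--     previous = None
--     for index in sorted(chosen):
--         if previous is not None and index != previous + 1: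
--             ordered.append("  ...")
--         ordered.append(lines[index])
--         previous = index
--     return "\n".join(ordered)
-- ===== SOURCE B (Python) =====
-- def excerpt_xdsl(xdsl_text: str, needles: list[str], context: int = 1) -> str:
--     lines = xdsl_text.splitlines()
--     n = len(lines)
--     ranges = []  # disjoint, non-adjacent half-open [lo, hi) windows, left to right
--     for i, line in enumerate(lines):
--         if any(needle in line for needle in needles):
--             lo, hi = max(0, i - context), min(n, i + context + 1)
--             if lo < hi:
--                 if ranges and lo <= ranges[-1][1]:
--                     ranges[-1][1] = max(ranges[-1][1], hi)
--                 else: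
--                     ranges.append([lo, hi])
--     if not ranges:
--         return "[no matching xDSL lines found]"
--     return "\n  ...\n".join("\n".join(lines[lo:hi]) for lo, hi in ranges)
-- ===== Notes on version B (the rewrite author's own statement) =====
-- stated objective: alternative
-- what changed: Instead of accumulating every context line index in a set, sorting it and re-walking it with a previous-index gap test, B merges each hit's half-open window into a running list of disjoint ranges in one pass and emits slices joined by the separator.
import Mathlib
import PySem

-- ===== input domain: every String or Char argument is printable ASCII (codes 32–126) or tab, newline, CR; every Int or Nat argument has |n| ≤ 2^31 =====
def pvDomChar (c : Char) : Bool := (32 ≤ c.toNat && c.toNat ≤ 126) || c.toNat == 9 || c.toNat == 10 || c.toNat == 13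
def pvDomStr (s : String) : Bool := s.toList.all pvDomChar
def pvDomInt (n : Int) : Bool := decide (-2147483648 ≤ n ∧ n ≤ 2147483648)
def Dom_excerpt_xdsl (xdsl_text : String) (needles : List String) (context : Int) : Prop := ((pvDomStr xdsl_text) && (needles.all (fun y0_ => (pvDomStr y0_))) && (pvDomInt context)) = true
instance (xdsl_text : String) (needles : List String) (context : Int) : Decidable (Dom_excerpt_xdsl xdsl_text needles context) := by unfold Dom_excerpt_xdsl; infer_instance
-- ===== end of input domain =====

-- B merges each hit's context window into a running list of disjoint ranges in one pass and joins
-- slices, instead of A's index set + sort + gap re-scan; alternative decomposition, proved equal.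

-- ===== PORT A =====
-- the body of A's second loop ('for index in sorted(chosen)'); state = (ordered, previous)
-- lines[index]: every chosen index is built in range [0, len(lines)), so pyGetD is exact here
def pvEmitA (lines : List String) (st : List String × Option Int) (index : Int) :
    List String × Option Int :=
  let ordered :=
    match st.2 with
    | some previous => if index ≠ previous + 1 then st.1 ++ ["  ..."] else st.1
    | none => st.1
  (ordered ++ [PySem.List.pyGetD lines index ""], some index)

def excerpt_xdsl (xdsl_text : String) (needles : List String) (context : Int) : String :=
  let lines := PySem.Str.splitlines xdsl_text
  let chosen : PySem.Set Int :=
    (PySem.List.enumerate lines).foldl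
      (fun chosen p =>
        if needles.any (fun needle => PySem.Str.isIn needle p.2) then
          (PySem.List.pyRange (max 0 (p.1 - context))
              (min (lines.length : Int) (p.1 + context + 1))).foldl
            (fun ch hit => PySem.Set.add ch hit) chosen
        else chosen)
      PySem.Set.empty
  if chosen = [] then "[no matching xDSL lines found]"
  else
    PySem.Str.join "\n"
      ((PySem.List.sorted chosen (fun x => x)).foldl (pvEmitA lines) ([], none)).1

-- ===== PORT B =====
-- merge the window of hit index i into the running disjoint range list (Python mutates ranges[-1])
def pvMergeB (n context : Int) (ranges : List (Int × Int)) (i : Int) : List (Int × Int) :=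
  let lo := max 0 (i - context)
  let hi := min n (i + context + 1)
  if lo < hi then
    match ranges.getLast? with
    | some r =>
        if lo ≤ r.2 then ranges.dropLast ++ [(r.1, max r.2 hi)]
        else ranges ++ [(lo, hi)]
    | none => [(lo, hi)]
  else ranges

def excerpt_xdsl_alt (xdsl_text : String) (needles : List String) (context : Int) : String :=
  let lines := PySem.Str.splitlines xdsl_text
  let ranges : List (Int × Int) :=
    (PySem.List.enumerate lines).foldl
      (fun ranges p =>
        if needles.any (fun needle => PySem.Str.isIn needle p.2) then
          pvMergeB (lines.length : Int) context ranges p.1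
        else ranges)
      []
  if ranges = [] then "[no matching xDSL lines found]"
  else
    PySem.Str.join "\n  ...\n"
      (ranges.map (fun r => PySem.Str.join "\n" (PySem.List.slice lines (some r.1) (some r.2))))

-- ===== PRECONDITION & SPEC =====
def Spec_excerpt_xdsl (xdsl_text : String) (needles : List String) (context : Int) (out : String) : Prop := out = excerpt_xdsl_alt xdsl_text needles context
instance (xdsl_text : String) (needles : List String) (context : Int) (out : String) : Decidable (Spec_excerpt_xdsl xdsl_text needles context out) := by unfold Spec_excerpt_xdsl; infer_instance

-- ===== CLAIM (what is proved, stated in full; the proofs are below) =====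
def Claim_equal_excerpt_xdsl : Prop := ∀ (xdsl_text : String) (needles : List String) (context : Int), Dom_excerpt_xdsl xdsl_text needles context → Spec_excerpt_xdsl xdsl_text needles context (excerpt_xdsl xdsl_text needles context)

-- ===== LEMMAS AND PROOFS =====

-- indices of the matching lines, in increasing order
def pvIdx (L : List String) (needles : List String) : List Int :=
  ((PySem.List.enumerate L).filter
      (fun p => needles.any (fun needle => PySem.Str.isIn needle p.2))).map (·.1)

-- all indices covered by a range list
def pvFlat (rs : List (Int × Int)) : List Int :=
  rs.flatMap (fun r => PySem.List.pyRange r.1 r.2)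

-- well-formed disjoint, non-adjacent, in-bounds range list
def pvOK (n : Int) (rs : List (Int × Int)) : Prop :=
  rs.Pairwise (fun a b => a.2 < b.1) ∧ ∀ r ∈ rs, 0 ≤ r.1 ∧ r.1 < r.2 ∧ r.2 ≤ n

lemma pvIdx_pairwise (L : List String) (needles : List String) :
    (pvIdx L needles).Pairwise (· < ·) := by
  unfold pvIdx
  rw [List.pairwise_map]
  apply List.Pairwise.filter
  have h := PySem.List.map_fst_enumerate L 0
  have h2 : (List.map (fun x => x.1) (PySem.List.enumerate L (0:Int))).Pairwise (· < ·) := by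
    rw [h]; exact PySem.List.pairwise_lt_pyRange_one _ _
  rwa [List.pairwise_map] at h2

lemma mem_foldl_update (g : Int → List Int) :
    ∀ (l : List Int) (s : PySem.Set Int) (x : Int),
      (x ∈ l.foldl (fun s i => PySem.Set.update s (g i)) s ↔ x ∈ s ∨ ∃ i ∈ l, x ∈ g i) := by
  intro l
  induction l with
  | nil => intro s x; simp
  | cons i l ih =>
    intro s x
    simp only [List.foldl_cons, ih, PySem.Set.mem_update, List.mem_cons]
    constructor
    · rintro ((h | h) | ⟨j, hj, hx⟩)
      · exact Or.inl h
      · exact Or.inr ⟨i, Or.inl rfl, h⟩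
      · exact Or.inr ⟨j, Or.inr hj, hx⟩
    · rintro (h | ⟨j, (rfl | hj), hx⟩)
      · exact Or.inl (Or.inl h)
      · exact Or.inl (Or.inr hx)
      · exact Or.inr ⟨j, hj, hx⟩

lemma nodup_foldl_update (g : Int → List Int) :
    ∀ (l : List Int) (s : PySem.Set Int), s.Nodup →
      (l.foldl (fun s i => PySem.Set.update s (g i)) s).Nodup := by
  intro l
  induction l with
  | nil => intro s h; simpa using h
  | cons i l ih =>
    intro s h
    simpa only [List.foldl_cons] using ih _ (PySem.Set.nodup_update _ _ h)

-- the merge invariant: the B fold keeps the range list well-formed and covers exactly the windows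
lemma mergeB_inv (n c : Int) :
    ∀ (l : List Int) (rs : List (Int × Int)),
      l.Pairwise (· < ·) → pvOK n rs →
      (∀ r, rs.getLast? = some r → ∀ i ∈ l, r.1 ≤ max 0 (i - c)) →
      pvOK n (l.foldl (pvMergeB n c) rs) ∧
        ∀ x, x ∈ pvFlat (l.foldl (pvMergeB n c) rs) ↔
          x ∈ pvFlat rs ∨ ∃ i ∈ l, max 0 (i - c) ≤ x ∧ x < min n (i + c + 1) := by
  intro l
  induction l with
  | nil =>
    intro rs _ hOK _
    refine ⟨hOK, fun x => ?_⟩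
    simp
  | cons i l ih =>
    intro rs hpw hOK hlast
    have hil : ∀ j ∈ l, i < j := (List.pairwise_cons.mp hpw).1
    have hpw' : l.Pairwise (· < ·) := (List.pairwise_cons.mp hpw).2
    -- the single step
    have hstep : pvOK n (pvMergeB n c rs i) ∧
        (∀ r, (pvMergeB n c rs i).getLast? = some r → ∀ j ∈ l, r.1 ≤ max 0 (j - c)) ∧
        (∀ x, x ∈ pvFlat (pvMergeB n c rs i) ↔
          x ∈ pvFlat rs ∨ (max 0 (i - c) ≤ x ∧ x < min n (i + c + 1))) := by
      unfold pvMergeB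
      by_cases hlh : max 0 (i - c) < min n (i + c + 1)
      · simp only [if_pos hlh]
        cases hg : rs.getLast? with
        | none =>
          have hrs : rs = [] := List.getLast?_eq_none_iff.mp hg
          subst hrs
          refine ⟨⟨List.pairwise_singleton _ _, ?_⟩, ?_, ?_⟩
          · intro r hr; simp at hr; subst hr
            refine ⟨le_max_left _ _, hlh, min_le_left _ _⟩
          · intro r hr j hj
            simp at hr
            have hij := hil j hj
            have : r.1 = max 0 (i - c) := by rw [← hr]
            omega
          · intro x
            simp [pvFlat, PySem.List.mem_pyRange_one]
        | some r =>
          have hmem : r ∈ rs := List.mem_of_getLast? hg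
          have hrb := hOK.2 r hmem
          have hrs : rs.dropLast ++ [r] = rs := by
            have hne : rs ≠ [] := by rintro rfl; simp at hg
            have h1 := List.dropLast_append_getLast hne
            have h2 : rs.getLast hne = r := by
              have h3 := List.getLast?_eq_some_getLast (l := rs) hne
              exact Option.some.inj (h3.symm.trans hg)
            rwa [h2] at h1
          have hdl : ∀ a ∈ rs.dropLast, a.2 < r.1 := by
            intro a ha
            have : rs.Pairwise (fun a b => a.2 < b.1) := hOK.1
            rw [← hrs] at this
            rcases List.pairwise_append.mp this with ⟨_, _, hcross⟩
            exact hcross a ha r (by simp)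
          have hplo : r.1 ≤ max 0 (i - c) := hlast r hg i (by simp)
          by_cases hle : max 0 (i - c) ≤ r.2
          · simp only [if_pos hle]
            refine ⟨⟨?_, ?_⟩, ?_, ?_⟩
            · rw [List.pairwise_append]
              refine ⟨?_, List.pairwise_singleton _ _, ?_⟩
              · have : rs.Pairwise (fun a b => a.2 < b.1) := hOK.1
                rw [← hrs] at this
                exact (List.pairwise_append.mp this).1
              · intro a ha b hb
                simp at hb; subst hb
                exact hdl a ha
            · intro s hs
              rcases List.mem_append.mp hs with hs | hs
              · exact hOK.2 s (by rw [← hrs]; exact List.mem_append_left _ hs)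
              · simp at hs; subst hs
                constructor
                · exact hrb.1
                constructor
                · have := hrb.2.1; omega
                · have h1 : r.2 ≤ n := hrb.2.2
                  have h2 : min n (i + c + 1) ≤ n := min_le_left _ _
                  simp only []; omega
            · intro s hs j hj
              rw [List.getLast?_concat] at hs
              cases hs
              have := hil j hj
              show r.1 ≤ max 0 (j - c)
              omega
            · intro x
              have h1 : pvFlat (rs.dropLast ++ [(r.1, max r.2 (min n (i + c + 1)))]) =
                  pvFlat rs.dropLast ++ PySem.List.pyRange r.1 (max r.2 (min n (i + c + 1))) := by
                simp [pvFlat]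
              have h2 : pvFlat rs = pvFlat rs.dropLast ++ PySem.List.pyRange r.1 r.2 := by
                conv_lhs => rw [← hrs]
                simp [pvFlat]
              rw [h1, h2]
              simp only [List.mem_append, PySem.List.mem_pyRange_one]
              constructor
              · rintro (h | h)
                · exact Or.inl (Or.inl h)
                · rcases h with ⟨ha, hb⟩
                  by_cases hx : x < r.2
                  · exact Or.inl (Or.inr ⟨ha, hx⟩)
                  · refine Or.inr ⟨?_, ?_⟩ <;> omega
              · rintro ((h | h) | h)
                · exact Or.inl h
                · exact Or.inr ⟨h.1, by omega⟩
                · exact Or.inr ⟨by omega, by omega⟩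
          · simp only [if_neg hle]
            have hgap : r.2 < max 0 (i - c) := by omega
            refine ⟨⟨?_, ?_⟩, ?_, ?_⟩
            · rw [List.pairwise_append]
              refine ⟨hOK.1, List.pairwise_singleton _ _, ?_⟩
              intro a ha b hb
              simp at hb; subst hb
              rcases List.mem_append.mp (hrs ▸ ha) with h | h
              · have := hdl a h
                have := hrb.2.1
                simp only []; omega
              · simp at h; subst h
                simpa using hgap
            · intro s hs
              rcases List.mem_append.mp hs with hs | hs
              · exact hOK.2 s hs
              · simp at hs; subst hs
                exact ⟨le_max_left _ _, hlh, min_le_left _ _⟩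
            · intro s hs j hj
              rw [List.getLast?_concat] at hs
              cases hs
              have := hil j hj
              show max 0 (i - c) ≤ max 0 (j - c)
              omega
            · intro x
              rw [show pvFlat (rs ++ [(max 0 (i - c), min n (i + c + 1))]) =
                  pvFlat rs ++ PySem.List.pyRange (max 0 (i - c)) (min n (i + c + 1)) from by
                simp [pvFlat]]
              simp [PySem.List.mem_pyRange_one]
      · simp only [if_neg hlh]
        refine ⟨hOK, fun r hr j hj => hlast r hr j (by simp [hj]), fun x => ?_⟩
        constructor
        · exact Or.inl
        · rintro (h | h)
          · exact h
          · omega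
    -- combine with the induction hypothesis
    have := ih (pvMergeB n c rs i) hpw' hstep.1 hstep.2.1
    rw [List.foldl_cons]
    refine ⟨this.1, fun x => ?_⟩
    rw [this.2 x, hstep.2.2 x]
    constructor
    · rintro ((h | h) | ⟨j, hj, hx⟩)
      · exact Or.inl h
      · exact Or.inr ⟨i, by simp, h⟩
      · exact Or.inr ⟨j, by simp [hj], hx⟩
    · rintro (h | ⟨j, hj, hx⟩)
      · exact Or.inl (Or.inl h)
      · rcases List.mem_cons.mp hj with rfl | hj
        · exact Or.inl (Or.inr hx)
        · exact Or.inr ⟨j, hj, hx⟩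

lemma pvFlat_pairwise (n : Int) : ∀ rs, pvOK n rs → (pvFlat rs).Pairwise (· < ·) := by
  intro rs
  induction rs with
  | nil => intro _; simp [pvFlat]
  | cons r rs ih =>
    intro hOK
    have hOK' : pvOK n rs := ⟨(List.pairwise_cons.mp hOK.1).2, fun s hs => hOK.2 s (by simp [hs])⟩
    rw [show pvFlat (r :: rs) = PySem.List.pyRange r.1 r.2 ++ pvFlat rs from by simp [pvFlat]]
    rw [List.pairwise_append]
    refine ⟨PySem.List.pairwise_lt_pyRange_one _ _, ih hOK', ?_⟩
    intro a ha b hb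
    rcases List.mem_flatMap.mp hb with ⟨s, hs, hbs⟩
    have h1 := (List.pairwise_cons.mp hOK.1).1 s hs
    have h2 := (PySem.List.mem_pyRange_one.mp ha).2
    have h3 := (PySem.List.mem_pyRange_one.mp hbs).1
    omega

-- A's emit loop over one contiguous block, starting just after its left end
lemma pvEmitA_block (L : List String) :
    ∀ (k : Nat) (a b : Int) (acc : List String), a ≤ b → (b - a).toNat = k →
      (PySem.List.pyRange a b).foldl (pvEmitA L) (acc, some (a - 1)) =
        (acc ++ (PySem.List.pyRange a b).map (fun j => PySem.List.pyGetD L j ""), some (b - 1)) := by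
  intro k
  induction k with
  | zero =>
    intro a b acc hab hk
    have : b = a := by omega
    subst this
    simp [PySem.List.pyRange_one_eq_nil (le_refl _)]
  | succ k ih =>
    intro a b acc hab hk
    have hlt : a < b := by omega
    rw [PySem.List.pyRange_one_cons hlt]
    simp only [List.foldl_cons, List.map_cons]
    have hstep : pvEmitA L (acc, some (a - 1)) a =
        (acc ++ [PySem.List.pyGetD L a ""], some a) := by
      have h1 : a - 1 + 1 = a := by omega
      simp [pvEmitA, h1]
    rw [hstep]
    have h2 : some a = some ((a + 1) - 1) := by norm_num
    rw [h2, ih (a + 1) b _ (by omega) (by omega)]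
    simp

-- entering a block with no previous index (the very first block)
lemma pvEmitA_start (L : List String) (a b : Int) (acc : List String) (hab : a < b) :
    (PySem.List.pyRange a b).foldl (pvEmitA L) (acc, none) =
      (acc ++ (PySem.List.pyRange a b).map (fun j => PySem.List.pyGetD L j ""), some (b - 1)) := by
  rw [PySem.List.pyRange_one_cons hab]
  simp only [List.foldl_cons, List.map_cons]
  have hstep : pvEmitA L (acc, none) a = (acc ++ [PySem.List.pyGetD L a ""], some a) := by
    simp [pvEmitA]
  rw [hstep]
  have h2 : some a = some ((a + 1) - 1) := by norm_num
  rw [h2, pvEmitA_block L (b - (a + 1)).toNat (a + 1) b _ (by omega) rfl]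
  simp

-- entering a block after a gap: the '  ...' separator is emitted
lemma pvEmitA_gap (L : List String) (a b p : Int) (acc : List String)
    (hab : a < b) (hp : p + 1 ≠ a) :
    (PySem.List.pyRange a b).foldl (pvEmitA L) (acc, some p) =
      (acc ++ "  ..." :: (PySem.List.pyRange a b).map (fun j => PySem.List.pyGetD L j ""),
        some (b - 1)) := by
  rw [PySem.List.pyRange_one_cons hab]
  simp only [List.foldl_cons, List.map_cons]
  have hstep : pvEmitA L (acc, some p) a =
      ((acc ++ ["  ..."]) ++ [PySem.List.pyGetD L a ""], some a) := by
    have h1 : a ≠ p + 1 := fun h => hp h.symm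
    simp [pvEmitA, h1]
  rw [hstep]
  have h2 : some a = some ((a + 1) - 1) := by norm_num
  rw [h2, pvEmitA_block L (b - (a + 1)).toNat (a + 1) b _ (by omega) rfl]
  simp

lemma pvEmit_tail (L : List String) (n : Int) :
    ∀ (rs : List (Int × Int)) (acc : List String) (p : Int),
      pvOK n rs → (∀ r ∈ rs, p + 1 < r.1) →
      (pvFlat rs).foldl (pvEmitA L) (acc, some p) =
        (acc ++ rs.flatMap
            (fun r => "  ..." :: (PySem.List.pyRange r.1 r.2).map
              (fun j => PySem.List.pyGetD L j "")),
          some ((rs.getLastD (0, p + 1)).2 - 1)) := by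
  intro rs
  induction rs with
  | nil => intro acc p _ _; simp [pvFlat]
  | cons r rs ih =>
    intro acc p hOK hgap
    have hr := hOK.2 r (by simp)
    have hOK' : pvOK n rs := ⟨(List.pairwise_cons.mp hOK.1).2, fun s hs => hOK.2 s (by simp [hs])⟩
    rw [show pvFlat (r :: rs) = PySem.List.pyRange r.1 r.2 ++ pvFlat rs from by simp [pvFlat],
      List.foldl_append]
    rw [pvEmitA_gap L r.1 r.2 p acc hr.2.1 (by have := hgap r (by simp); omega)]
    have h2 : some (r.2 - 1) = some ((r.2 - 1) : Int) := rfl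
    rw [ih _ (r.2 - 1) hOK' (by
      intro s hs
      have := (List.pairwise_cons.mp hOK.1).1 s hs
      omega)]
    refine Prod.ext ?_ ?_
    · simp
    · have h3 : r.2 - 1 + 1 = r.2 := by omega
      rw [h3, List.getLastD_cons]
      cases rs with
      | nil => simp
      | cons s rs => rw [List.getLastD_cons, List.getLastD_cons]

lemma pvEmit_all (L : List String) (n : Int) (r0 : Int × Int) (rs : List (Int × Int))
    (hOK : pvOK n (r0 :: rs)) :
    ((pvFlat (r0 :: rs)).foldl (pvEmitA L) ([], none)).1 =
      (PySem.List.pyRange r0.1 r0.2).map (fun j => PySem.List.pyGetD L j "") ++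
        rs.flatMap (fun r => "  ..." :: (PySem.List.pyRange r.1 r.2).map
          (fun j => PySem.List.pyGetD L j "")) := by
  have hr0 := hOK.2 r0 (by simp)
  have hOK' : pvOK n rs := ⟨(List.pairwise_cons.mp hOK.1).2, fun s hs => hOK.2 s (by simp [hs])⟩
  rw [show pvFlat (r0 :: rs) = PySem.List.pyRange r0.1 r0.2 ++ pvFlat rs from by simp [pvFlat],
    List.foldl_append]
  rw [pvEmitA_start L r0.1 r0.2 [] hr0.2.1]
  rw [pvEmit_tail L n rs _ (r0.2 - 1) hOK' (by
    intro s hs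
    have := (List.pairwise_cons.mp hOK.1).1 s hs
    omega)]
  simp

-- reading a block of lines one index at a time is the slice
lemma pvMap_pyGetD_eq_slice (L : List String) (lo hi : Int)
    (h0 : 0 ≤ lo) (hlh : lo ≤ hi) (hn : hi ≤ (L.length : Int)) :
    (PySem.List.pyRange lo hi).map (fun j => PySem.List.pyGetD L j "") =
      PySem.List.slice L (some lo) (some hi) := by
  rw [PySem.List.slice_of_nonneg L h0 (by omega) (by omega) hn]
  apply List.ext_getElem
  · simp [PySem.List.length_pyRange_one]
    omega
  · intro k h1 h2
    have hk : (k : Int) < hi - lo := by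
      have := h1; simp [PySem.List.length_pyRange_one] at this; omega
    rw [List.getElem_map, PySem.List.getElem_pyRange_one]
    rw [List.getElem_take, List.getElem_drop]
    have hidx : lo.toNat + k < L.length := by omega
    rw [PySem.List.pyGetD_of_nonneg L _ (by omega)]
    rw [List.getD_eq_getElem L "" (by omega : (lo + k).toNat < L.length)]
    congr 1
    omega

-- splitting a join at an interior element
lemma pvJoin_split (sep : List Char) :
    ∀ (xs : List (List Char)) (y : List Char) (ys : List (List Char)), xs ≠ [] →
      PySem.Chars.join sep (xs ++ y :: ys) =
        PySem.Chars.join sep xs ++ sep ++ PySem.Chars.join sep (y :: ys) := by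
  intro xs
  induction xs with
  | nil => intro y ys h; exact absurd rfl h
  | cons x xs ih =>
    intro y ys _
    cases xs with
    | nil => simp [PySem.Chars.join_cons_cons, PySem.Chars.join_singleton]
    | cons x2 xs2 =>
      rw [List.cons_append, List.cons_append, PySem.Chars.join_cons_cons,
        ← List.cons_append, ih y ys (by simp), PySem.Chars.join_cons_cons]
      simp [List.append_assoc]

lemma pvChars_join_dots (nl dots : List Char) :
    ∀ (cs : List (List (List Char))) (c0 : List (List Char)), c0 ≠ [] → (∀ c ∈ cs, c ≠ []) →
      PySem.Chars.join nl (c0 ++ cs.flatMap (fun c => dots :: c)) =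
        PySem.Chars.join (nl ++ dots ++ nl) ((c0 :: cs).map (PySem.Chars.join nl)) := by
  intro cs
  induction cs with
  | nil =>
    intro c0 h0 _
    simp [PySem.Chars.join_singleton]
  | cons c cs ih =>
    intro c0 h0 hne
    have hc : c ≠ [] := hne c (by simp)
    have hrest : ∀ c' ∈ cs, c' ≠ [] := fun c' h => hne c' (by simp [h])
    obtain ⟨a, ct, rfl⟩ := List.exists_cons_of_ne_nil hc
    rw [show ((a :: ct) :: cs).flatMap (fun c => dots :: c) =
        dots :: ((a :: ct) ++ cs.flatMap (fun c => dots :: c)) from by simp]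
    rw [pvJoin_split nl c0 dots ((a :: ct) ++ cs.flatMap (fun c => dots :: c)) h0]
    rw [show (a :: ct) ++ cs.flatMap (fun c => dots :: c) =
        a :: (ct ++ cs.flatMap (fun c => dots :: c)) from by simp]
    rw [PySem.Chars.join_cons_cons]
    rw [show a :: (ct ++ cs.flatMap (fun c => dots :: c)) =
        (a :: ct) ++ cs.flatMap (fun c => dots :: c) from by simp]
    rw [ih (a :: ct) (by simp) hrest]
    rw [show ((c0 :: (a :: ct) :: cs).map (PySem.Chars.join nl)) =
        PySem.Chars.join nl c0 :: PySem.Chars.join nl (a :: ct) :: cs.map (PySem.Chars.join nl) from by simp]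
    rw [PySem.Chars.join_cons_cons]
    simp [List.append_assoc]

lemma pvStr_join_dots (cs : List (List String)) (c0 : List String)
    (h0 : c0 ≠ []) (hne : ∀ c ∈ cs, c ≠ []) :
    PySem.Str.join "\n" (c0 ++ cs.flatMap (fun c => "  ..." :: c)) =
      PySem.Str.join "\n  ...\n" ((c0 :: cs).map (PySem.Str.join "\n")) := by
  simp only [PySem.Str.join]
  congr 1
  have hsep : ("\n  ...\n").toList = ("\n").toList ++ ("  ...").toList ++ ("\n").toList := by decide
  rw [hsep]
  rw [show List.map String.toList (c0 ++ cs.flatMap (fun c => "  ..." :: c)) =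
      c0.map String.toList ++ (cs.map (List.map String.toList)).flatMap
        (fun c => ("  ...").toList :: c) from by
    simp [List.map_flatMap, List.flatMap_map]]
  rw [pvChars_join_dots ("\n").toList ("  ...").toList (cs.map (List.map String.toList))
    (c0.map String.toList) (by simpa using h0)
    (by intro c hc; rcases List.mem_map.mp hc with ⟨d, hd, rfl⟩; simpa using hne d hd)]
  congr 1
  simp [List.map_map, Function.comp]

-- the core equality, on an arbitrary line list
theorem pvCore (L : List String) (needles : List String) (c : Int) :
    (if ((PySem.List.enumerate L).foldl
          (fun chosen p =>
            if needles.any (fun needle => PySem.Str.isIn needle p.2) then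
              (PySem.List.pyRange (max 0 (p.1 - c))
                  (min (L.length : Int) (p.1 + c + 1))).foldl
                (fun ch hit => PySem.Set.add ch hit) chosen
            else chosen)
          PySem.Set.empty) = [] then "[no matching xDSL lines found]"
      else
        PySem.Str.join "\n"
          ((PySem.List.sorted
              ((PySem.List.enumerate L).foldl
                (fun chosen p =>
                  if needles.any (fun needle => PySem.Str.isIn needle p.2) then
                    (PySem.List.pyRange (max 0 (p.1 - c))
                        (min (L.length : Int) (p.1 + c + 1))).foldl
                      (fun ch hit => PySem.Set.add ch hit) chosen
                  else chosen)
                PySem.Set.empty) (fun x => x)).foldl (pvEmitA L) ([], none)).1) =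
    (if ((PySem.List.enumerate L).foldl
          (fun ranges p =>
            if needles.any (fun needle => PySem.Str.isIn needle p.2) then
              pvMergeB (L.length : Int) c ranges p.1
            else ranges) ([] : List (Int × Int))) = [] then "[no matching xDSL lines found]"
      else
        PySem.Str.join "\n  ...\n"
          (((PySem.List.enumerate L).foldl
              (fun ranges p =>
                if needles.any (fun needle => PySem.Str.isIn needle p.2) then
                  pvMergeB (L.length : Int) c ranges p.1
                else ranges) ([] : List (Int × Int))).map
            (fun r => PySem.Str.join "\n" (PySem.List.slice L (some r.1) (some r.2))))) := by
  have E1 : ((PySem.List.enumerate L).foldl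
      (fun chosen p =>
        if needles.any (fun needle => PySem.Str.isIn needle p.2) then
          (PySem.List.pyRange (max 0 (p.1 - c))
              (min (L.length : Int) (p.1 + c + 1))).foldl
            (fun ch hit => PySem.Set.add ch hit) chosen
        else chosen)
      PySem.Set.empty) =
      (pvIdx L needles).foldl
        (fun s i => PySem.Set.update s
          (PySem.List.pyRange (max 0 (i - c)) (min (L.length : Int) (i + c + 1)))) [] := by
    unfold pvIdx
    rw [List.foldl_map, ← PySem.List.foldl_if_eq_foldl_filter]
    rfl
  have E2 : ((PySem.List.enumerate L).foldl
      (fun ranges p =>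
        if needles.any (fun needle => PySem.Str.isIn needle p.2) then
          pvMergeB (L.length : Int) c ranges p.1
        else ranges) ([] : List (Int × Int))) =
      (pvIdx L needles).foldl (pvMergeB (L.length : Int) c) [] := by
    unfold pvIdx
    rw [List.foldl_map, ← PySem.List.foldl_if_eq_foldl_filter]
  rw [E1, E2]
  set n : Int := (L.length : Int) with hn
  set is := pvIdx L needles with his
  set R := is.foldl (pvMergeB n c) [] with hR
  set chosen := is.foldl
    (fun s i => PySem.Set.update s
      (PySem.List.pyRange (max 0 (i - c)) (min n (i + c + 1)))) ([] : PySem.Set Int) with hchosen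
  have hinv := mergeB_inv n c is [] (pvIdx_pairwise L needles)
    ⟨List.Pairwise.nil, by simp⟩ (by intro r hr; simp at hr)
  have hOKR : pvOK n R := hinv.1
  have hmemR : ∀ x, x ∈ pvFlat R ↔ ∃ i ∈ is, max 0 (i - c) ≤ x ∧ x < min n (i + c + 1) := by
    intro x
    rw [hinv.2 x]
    simp [pvFlat]
  have hmemC : ∀ x, x ∈ chosen ↔ ∃ i ∈ is, max 0 (i - c) ≤ x ∧ x < min n (i + c + 1) := by
    intro x
    rw [hchosen, mem_foldl_update]
    simp [PySem.List.mem_pyRange_one]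
  have hiff : chosen = [] ↔ R = [] := by
    constructor
    · intro h
      by_contra hne
      cases hRc : R with
      | nil => exact hne hRc
      | cons r0 rs =>
        have h1 : r0.1 ∈ pvFlat R := by
          rw [hRc]
          simp only [pvFlat, List.flatMap_cons, List.mem_append]
          exact Or.inl (PySem.List.mem_pyRange_one.mpr
            ⟨le_refl _, (hOKR.2 r0 (by rw [hRc]; simp)).2.1⟩)
        rw [hmemR] at h1
        have h2 := (hmemC r0.1).mpr h1
        rw [h] at h2
        simp at h2
    · intro h
      rw [List.eq_nil_iff_forall_not_mem]
      intro x hx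
      have h1 := (hmemC x).mp hx
      have h2 := (hmemR x).mpr h1
      rw [h] at h2
      simp [pvFlat] at h2
  cases hRc : R with
  | nil =>
    rw [if_pos (hiff.mpr hRc)]
    simp
  | cons r0 rs =>
    have hCne : chosen ≠ [] := fun h => by rw [hiff.mp h] at hRc; simp at hRc
    rw [if_neg hCne, if_neg (by simp : ¬((r0 : Int × Int) :: rs = []))]
    -- sorted chosen = pvFlat R
    have hndC : chosen.Nodup := by
      rw [hchosen]
      exact nodup_foldl_update _ is [] List.nodup_nil
    have hpwF : (pvFlat R).Pairwise (· < ·) := pvFlat_pairwise n R hOKR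
    have hndF : (pvFlat R).Nodup := hpwF.imp (fun h => ne_of_lt h)
    have hperm : (pvFlat R).Perm chosen :=
      (List.perm_ext_iff_of_nodup hndF hndC).mpr
        (fun a => by rw [hmemR a, hmemC a])
    have hsorted : PySem.List.sorted chosen (fun x => x) = pvFlat R :=
      PySem.List.sorted_eq_of_perm_of_pairwise_lt chosen (pvFlat R) (fun x => x) hperm hpwF
    rw [hsorted, hRc]
    have hOKc : pvOK n (r0 :: rs) := hRc ▸ hOKR
    rw [pvEmit_all L n r0 rs hOKc]
    -- rewrite each block of reads as a slice
    have hrw : ∀ r ∈ r0 :: rs,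
        (PySem.List.pyRange r.1 r.2).map (fun j => PySem.List.pyGetD L j "") =
          PySem.List.slice L (some r.1) (some r.2) := by
      intro r hr
      have hb := hOKc.2 r hr
      exact pvMap_pyGetD_eq_slice L r.1 r.2 hb.1 (le_of_lt hb.2.1) hb.2.2
    rw [hrw r0 (by simp)]
    rw [show rs.flatMap (fun r => "  ..." :: (PySem.List.pyRange r.1 r.2).map
        (fun j => PySem.List.pyGetD L j "")) =
        (rs.map (fun r => PySem.List.slice L (some r.1) (some r.2))).flatMap
          (fun ch => "  ..." :: ch) from by
      rw [List.flatMap_map]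
      apply List.flatMap_congr
      intro r hr
      rw [hrw r (by simp [hr])]]
    have hslice_ne : ∀ r ∈ r0 :: rs, PySem.List.slice L (some r.1) (some r.2) ≠ [] := by
      intro r hr
      have hb := hOKc.2 r hr
      rw [PySem.List.slice_of_nonneg L hb.1 (by omega) (by omega) hb.2.2]
      intro hnil
      have := congrArg List.length hnil
      simp at this
      omega
    rw [pvStr_join_dots (rs.map (fun r => PySem.List.slice L (some r.1) (some r.2)))
      (PySem.List.slice L (some r0.1) (some r0.2)) (hslice_ne r0 (by simp))
      (by intro ch hch; rcases List.mem_map.mp hch with ⟨r, hr, rfl⟩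
          exact hslice_ne r (by simp [hr]))]
    simp [List.map_map, Function.comp_def]

-- ===== VERDICT (by name: the statement is the Claim_ definition above) =====
theorem excerpt_xdsl_spec : Claim_equal_excerpt_xdsl := by
  intro xdsl_text needles context _
  unfold Spec_excerpt_xdsl excerpt_xdsl excerpt_xdsl_alt
  exact pvCore (PySem.Str.splitlines xdsl_text) needles context
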